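-- pv_equiv track=rewrite | github.com/FilipStadler/threebot | threebot/util.py | into_pages
-- ===== SOURCE A (Python) =====
-- def into_pages(headers, rows, rows_per_page=32):
--     pages = []
--
--     while len(rows) > 0:
--         msg = '<table><tr>'
--
--         for h in headers:
--             msg += '<th>{0}</th>'.format(h)
--
--         msg += '</tr>'
--
--         for r in rows[0:rows_per_page]:
--             msg += '<tr>'
--
--             for el in r:
--                 msg += '<td>{0}</td>'.format(el)
--
--         msg += '</table>'
--         pages.append(msg)
--
--         rows = rows[rows_per_page:]
--
--     return pages
-- ===== SOURCE B (Python) =====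
-- def into_pages(headers, rows, rows_per_page=32):
--     if not rows:
--         return []
--     header = '<table><tr>' + ''.join('<th>{0}</th>'.format(h) for h in headers) + '</tr>'
--     return [header
--             + ''.join('<tr>' + ''.join('<td>{0}</td>'.format(el) for el in r)
--                       for r in rows[i:i + rows_per_page])
--             + '</table>'
--             for i in range(0, len(rows), rows_per_page)]
-- ===== Notes on version B (the rewrite author's own statement) =====
-- stated objective: alternative
-- what changed: B replaces A's destructive while-loop (repeatedly re-building the header and re-slicing the shrinking rows list, appending to an accumulator) with a single precomputed header string plus a one-pass list comprehension over chunk start indices range(0, len(rows), rows_per_page); the header cells are formatted once instead of once per page.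
import Mathlib
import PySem

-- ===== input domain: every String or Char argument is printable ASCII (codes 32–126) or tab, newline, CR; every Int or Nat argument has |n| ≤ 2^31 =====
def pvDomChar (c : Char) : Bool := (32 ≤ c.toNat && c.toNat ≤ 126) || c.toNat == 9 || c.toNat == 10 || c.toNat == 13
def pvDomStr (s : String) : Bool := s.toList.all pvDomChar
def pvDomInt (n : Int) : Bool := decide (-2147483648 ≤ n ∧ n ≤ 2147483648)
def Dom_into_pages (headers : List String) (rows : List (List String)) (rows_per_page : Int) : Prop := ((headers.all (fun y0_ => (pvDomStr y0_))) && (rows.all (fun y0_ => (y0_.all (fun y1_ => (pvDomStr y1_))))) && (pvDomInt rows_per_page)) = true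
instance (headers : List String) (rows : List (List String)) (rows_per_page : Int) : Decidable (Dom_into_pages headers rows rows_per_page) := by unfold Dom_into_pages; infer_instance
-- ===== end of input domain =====

-- B builds the header once and maps over chunk start indices instead of A's while-loop that
-- re-builds the header and re-slices a shrinking copy of rows; return values proved equal wherever A terminates.

-- ===== PORT A =====
-- A's while-loop, fueled (fuel = rows.length + 1 suffices whenever A terminates, i.e. on Pre_):
-- each iteration builds msg by string concatenation (msg is kept as List Char; the final page is String.ofList msg).
def intoPagesGo (headers : List String) (rows_per_page : Int)
    (rows : List (List String)) (pages : List String) (fuel : Nat) : List String :=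
  match fuel with
  | 0 => pages
  | fuel + 1 =>
    if 0 < PySem.List.len rows then
      -- msg = '<table><tr>'; for h in headers: msg += '<th>{0}</th>'.format(h)
      let msg := headers.foldl
        (fun m h => m ++ "<th>".toList ++ h.toList ++ "</th>".toList) "<table><tr>".toList
      let msg := msg ++ "</tr>".toList
      -- for r in rows[0:rows_per_page]: msg += '<tr>'; for el in r: msg += '<td>{0}</td>'.format(el)
      let msg := (PySem.List.slice rows (some 0) (some rows_per_page)).foldl
        (fun m r => r.foldl (fun m el => m ++ "<td>".toList ++ el.toList ++ "</td>".toList)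
                      (m ++ "<tr>".toList)) msg
      let msg := msg ++ "</table>".toList
      intoPagesGo headers rows_per_page
        (PySem.List.slice rows (some rows_per_page) none)
        (pages ++ [String.ofList msg]) fuel
    else pages

def into_pages (headers : List String) (rows : List (List String)) (rows_per_page : Int) : List String :=
  intoPagesGo headers rows_per_page rows [] (rows.length + 1)

-- ===== PORT B =====
-- '<th>{0}</th>'.format(h) etc., and ''.join over a generator = flatMap on the char-list side
def pvThChars (h : String) : List Char := "<th>".toList ++ h.toList ++ "</th>".toList
def pvTdChars (el : String) : List Char := "<td>".toList ++ el.toList ++ "</td>".toList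
-- header = '<table><tr>' + ''.join('<th>{0}</th>'.format(h) for h in headers) + '</tr>'
def pvHeaderChars (headers : List String) : List Char :=
  "<table><tr>".toList ++ headers.flatMap pvThChars ++ "</tr>".toList
-- '<tr>' + ''.join('<td>{0}</td>'.format(el) for el in r)
def pvRowChars (r : List String) : List Char := "<tr>".toList ++ r.flatMap pvTdChars

def into_pages_alt (headers : List String) (rows : List (List String)) (rows_per_page : Int) : List String :=
  if rows.isEmpty then []
  else
    let header := pvHeaderChars headers
    (PySem.List.pyRange 0 (PySem.List.len rows) rows_per_page).map (fun i =>
      String.ofList (header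
        ++ (PySem.List.slice rows (some i) (some (i + rows_per_page))).flatMap pvRowChars
        ++ "</table>".toList))

-- ===== PRECONDITION & SPEC =====
-- Pre_ excludes exactly the inputs on which the Python A never returns: with nonempty rows and
-- rows_per_page ≤ 0, A's 'rows = rows[rows_per_page:]' never empties rows and the while-loop diverges.
def Pre_into_pages (headers : List String) (rows : List (List String)) (rows_per_page : Int) : Prop :=
  rows = [] ∨ 1 ≤ rows_per_page
instance (headers : List String) (rows : List (List String)) (rows_per_page : Int) : Decidable (Pre_into_pages headers rows rows_per_page) := by unfold Pre_into_pages; infer_instance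
def pvWitness_into_pages : List String × List (List String) × Int := (["h1", "h2"], [["a"], ["b"]], 1)

def Spec_into_pages (headers : List String) (rows : List (List String)) (rows_per_page : Int) (out : List String) : Prop := out = into_pages_alt headers rows rows_per_page
instance (headers : List String) (rows : List (List String)) (rows_per_page : Int) (out : List String) : Decidable (Spec_into_pages headers rows rows_per_page out) := by unfold Spec_into_pages; infer_instance

-- ===== CLAIM (what is proved, stated in full; the proofs are below) =====
def Claim_equal_into_pages : Prop := ∀ (headers : List String) (rows : List (List String)) (rows_per_page : Int), Dom_into_pages headers rows rows_per_page → Pre_into_pages headers rows rows_per_page → Spec_into_pages headers rows rows_per_page (into_pages headers rows rows_per_page)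

-- ===== LEMMAS AND PROOFS =====

-- the chunks rows[0:k], rows[k:2k], ... for chunk size k, indexed like B's range loop
def pvChunksR (k : Nat) (rows : List (List String)) : List (List (List String)) :=
  (List.range ((rows.length + (k - 1)) / k)).map (fun j => (rows.drop (k * j)).take k)

-- one page's string, as both programs produce it
def pvPage (headers : List String) (chunk : List (List String)) : String :=
  String.ofList (pvHeaderChars headers ++ chunk.flatMap pvRowChars ++ "</table>".toList)

lemma pvChunksR_nil (k : Nat) (hk : 1 ≤ k) : pvChunksR k [] = [] := by
  simp [pvChunksR, Nat.div_eq_of_lt (by omega : k - 1 < k)]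

lemma pvChunksR_cons (k : Nat) (hk : 1 ≤ k) (rows : List (List String)) (hne : rows ≠ []) :
    pvChunksR k rows = rows.take k :: pvChunksR k (rows.drop k) := by
  have hn : 1 ≤ rows.length := List.length_pos_iff.mpr hne
  have hm : (rows.length + (k - 1)) / k = ((rows.drop k).length + (k - 1)) / k + 1 := by
    rw [List.length_drop]
    by_cases hle : k ≤ rows.length
    · have h2 : rows.length + (k - 1) = (rows.length - k + (k - 1)) + k := by omega
      rw [h2, Nat.add_div_right _ (by omega)]
    · have hd : rows.length - k = 0 := by omega
      have hR : (0 + (k - 1)) / k = 0 := Nat.div_eq_of_lt (by omega)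
      have hL : (rows.length + (k - 1)) / k = 1 := by
        rw [Nat.div_eq_sub_div (by omega) (by omega), Nat.div_eq_of_lt (by omega)]
      rw [hd, hR, hL]
  unfold pvChunksR
  rw [hm, List.range_succ_eq_map, List.map_cons, List.map_map]
  refine List.cons_eq_cons.mpr ⟨by simp, ?_⟩
  apply List.map_congr_left
  intro a _
  simp only [Function.comp_apply]
  have h3 : k * (a + 1) = k * a + k := by ring
  rw [h3, Nat.add_comm (k * a) k]
  simp [List.drop_drop]

-- A's msg-building folds, named: header cells, one row, one chunk of rows
lemma pvHeader_foldl (headers : List String) :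
    headers.foldl (fun m h => m ++ "<th>".toList ++ h.toList ++ "</th>".toList)
        "<table><tr>".toList = "<table><tr>".toList ++ headers.flatMap pvThChars := by
  have h : (fun (m : List Char) h => m ++ "<th>".toList ++ h.toList ++ "</th>".toList)
      = fun m h => m ++ pvThChars h := by funext m h; simp [pvThChars]
  rw [h, PySem.List.foldl_append_eq_flatMap]

lemma pvRow_foldl (r : List String) (m : List Char) :
    r.foldl (fun m el => m ++ "<td>".toList ++ el.toList ++ "</td>".toList)
        (m ++ "<tr>".toList) = m ++ pvRowChars r := by
  have h : (fun (m : List Char) el => m ++ "<td>".toList ++ el.toList ++ "</td>".toList)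
      = fun m el => m ++ pvTdChars el := by funext m el; simp [pvTdChars]
  rw [h, PySem.List.foldl_append_eq_flatMap]
  simp [pvRowChars]

lemma pvChunk_foldl (chunk : List (List String)) (m : List Char) :
    chunk.foldl (fun m r =>
        r.foldl (fun m el => m ++ "<td>".toList ++ el.toList ++ "</td>".toList)
          (m ++ "<tr>".toList)) m = m ++ chunk.flatMap pvRowChars := by
  have h : (fun (m : List Char) r =>
      r.foldl (fun m el => m ++ "<td>".toList ++ el.toList ++ "</td>".toList)
        (m ++ "<tr>".toList)) = fun m r => m ++ pvRowChars r := by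
    funext m r; exact pvRow_foldl r m
  rw [h, PySem.List.foldl_append_eq_flatMap]

-- A's loop produces the pages of pvChunksR, given enough fuel (rows.length + 1 suffices since k ≥ 1)
lemma intoPagesGo_eq (headers : List String) (rpp : Int) (h1 : 1 ≤ rpp) :
    ∀ (fuel : Nat) (rows : List (List String)) (pages : List String), rows.length ≤ fuel →
      intoPagesGo headers rpp rows pages fuel
        = pages ++ (pvChunksR rpp.toNat rows).map (pvPage headers) := by
  have hk : 1 ≤ rpp.toNat := by omega
  intro fuel
  induction fuel with
  | zero =>
    intro rows pages hf
    have h0 : rows = [] := List.length_eq_zero_iff.mp (Nat.le_zero.mp hf)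
    subst h0
    simp [intoPagesGo, pvChunksR_nil _ hk]
  | succ fuel ih =>
    intro rows pages hf
    rcases eq_or_ne rows [] with hnil | hne
    · subst hnil; simp [intoPagesGo, pvChunksR_nil _ hk, PySem.List.len]
    · have hpos : 0 < PySem.List.len rows := by
        simp [PySem.List.len_eq]
        exact List.length_pos_iff.mpr hne
      have hsl0 : PySem.List.slice rows (some 0) (some rpp) = rows.take rpp.toNat := by
        rw [PySem.List.slice_toNat rows (by omega) (by omega)]; simp
      have hsl1 : PySem.List.slice rows (some rpp) none = rows.drop rpp.toNat :=
        PySem.List.slice_from rows (by omega)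
      rw [intoPagesGo, if_pos hpos]
      simp only [hsl0, hsl1, pvHeader_foldl, pvChunk_foldl]
      rw [ih _ _ (by simp; omega)]
      rw [pvChunksR_cons _ hk rows hne]
      simp [pvPage, pvHeaderChars]

-- B equals the pvChunksR pages on nonempty rows
lemma into_pages_alt_eq (headers : List String) (rows : List (List String)) (rpp : Int)
    (h1 : 1 ≤ rpp) (hne : rows ≠ []) :
    into_pages_alt headers rows rpp = (pvChunksR rpp.toNat rows).map (pvPage headers) := by
  obtain ⟨k, rfl⟩ : ∃ k : Nat, rpp = (k : Int) := ⟨rpp.toNat, by omega⟩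
  have hk : 1 ≤ k := by exact_mod_cast h1
  have htn : ((k : Int)).toNat = k := Int.toNat_natCast k
  rw [htn]
  rw [into_pages_alt, if_neg (by simpa [List.isEmpty_iff] using hne)]
  rw [PySem.List.pyRange_of_pos 0 (PySem.List.len rows) (by exact_mod_cast hk)]
  have hpos : (0 : Int) < PySem.List.len rows := by
    rw [PySem.List.len_eq]
    exact_mod_cast List.length_pos_iff.mpr hne
  rw [if_pos hpos]
  have hcnt : ((PySem.List.len rows - 0 + (k : Int) - 1) / (k : Int)).toNat
      = (rows.length + (k - 1)) / k := by
    rw [PySem.List.len_eq]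
    have h2 : ((rows.length : Int) - 0 + (k : Int) - 1)
        = ((rows.length + (k - 1) : Nat) : Int) := by push_cast; omega
    rw [h2]
    rfl
  rw [hcnt]
  unfold pvChunksR
  simp only [List.map_map]
  apply List.map_congr_left
  intro j _
  simp only [Function.comp_apply]
  have hsl : PySem.List.slice rows (some (0 + (k : Int) * (j : Int)))
      (some (0 + (k : Int) * (j : Int) + (k : Int))) = (rows.drop (k * j)).take k := by
    rw [PySem.List.slice_toNat rows (by positivity) (by positivity)]
    have e1 : (0 + (k : Int) * (j : Int)).toNat = k * j := by norm_cast; omega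
    have e2 : (0 + (k : Int) * (j : Int) + (k : Int)).toNat = k * j + k := by norm_cast; omega
    rw [e1, e2]
    congr 1
    omega
  rw [hsl]
  simp [pvPage, pvHeaderChars]

-- ===== VERDICT (by name: the statement is the Claim_ definition above) =====
theorem into_pages_spec : Claim_equal_into_pages := by
  intro headers rows rpp _ hpre
  unfold Spec_into_pages
  rcases hpre with hnil | h1
  · subst hnil
    simp [into_pages, intoPagesGo, into_pages_alt, PySem.List.len]
  · rcases eq_or_ne rows [] with hnil | hne
    · subst hnil
      simp [into_pages, intoPagesGo, into_pages_alt, PySem.List.len]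
    · rw [into_pages, intoPagesGo_eq headers rpp h1 _ _ _ (Nat.le_succ _),
        into_pages_alt_eq headers rows rpp h1 hne]
      simp
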